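-- pv_equiv track=rewrite | github.com/Forelow/NAISC | app/semi_structured/spec_builder.py | _sample_records
-- ===== SOURCE A (Python) =====
-- from typing import Any
--
-- def _sample_records(text_payload: dict[str, Any], limit: int = 12) -> list[str]:
--     lines = [item.get("text", "") for item in text_payload.get("lines", [])]
--     non_empty = [line.strip() for line in lines if line.strip()]
--     if not non_empty:
--         return []
--
--     # Try blank-line blocks only if they produce multiple meaningful blocks
--     blank_count = sum(1 for line in lines if not line.strip())
--     if blank_count >= 2:
--         blocks: list[str] = []
--         current: list[str] = []
--         for line in lines:
--             if line.strip():
--                 current.append(line.rstrip())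
--             elif current:
--                 blocks.append("\n".join(current).strip())
--                 current = []
--         if current:
--             blocks.append("\n".join(current).strip())
--
--         # Only use block mode if it actually creates multiple blocks
--         if len(blocks) >= 2:
--             return blocks[:limit]
--
--     # Otherwise default to normal per-line sampling
--     return non_empty[:limit]
-- ===== SOURCE B (Python) =====
-- def _sample_records(text_payload, limit=12):
--     lines = [item.get("text", "") for item in text_payload.get("lines", [])]
--     non_empty = [s for s in (line.strip() for line in lines) if s]
--     if not non_empty:
--         return []
--
--     # blank count = total lines minus non-blank lines (no second scan of strips)
--     if len(lines) - len(non_empty) >= 2: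
--         blocks = _blocks(lines)
--         if len(blocks) >= 2:
--             return blocks[:limit]
--
--     return non_empty[:limit]
--
--
-- def _blocks(lines):
--     """Split lines into blank-separated blocks by scanning maximal runs."""
--     blocks = []
--     rest = lines
--     while rest:
--         if not rest[0].strip():
--             rest = rest[1:]
--             continue
--         i = 1
--         while i < len(rest) and rest[i].strip():
--             i += 1
--         blocks.append("\n".join(l.rstrip() for l in rest[:i]).strip())
--         rest = rest[i:]
--     return blocks
-- ===== Notes on version B (the rewrite author's own statement) =====
-- stated objective: simpler
-- what changed: The accumulator state machine (current list, flush on blank, flush after loop) is replaced by a run-based splitter that scans each maximal non-blank run at once, and blank_count is computed as len(lines) - len(non_empty) instead of a third pass over the strips.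
import Mathlib
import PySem

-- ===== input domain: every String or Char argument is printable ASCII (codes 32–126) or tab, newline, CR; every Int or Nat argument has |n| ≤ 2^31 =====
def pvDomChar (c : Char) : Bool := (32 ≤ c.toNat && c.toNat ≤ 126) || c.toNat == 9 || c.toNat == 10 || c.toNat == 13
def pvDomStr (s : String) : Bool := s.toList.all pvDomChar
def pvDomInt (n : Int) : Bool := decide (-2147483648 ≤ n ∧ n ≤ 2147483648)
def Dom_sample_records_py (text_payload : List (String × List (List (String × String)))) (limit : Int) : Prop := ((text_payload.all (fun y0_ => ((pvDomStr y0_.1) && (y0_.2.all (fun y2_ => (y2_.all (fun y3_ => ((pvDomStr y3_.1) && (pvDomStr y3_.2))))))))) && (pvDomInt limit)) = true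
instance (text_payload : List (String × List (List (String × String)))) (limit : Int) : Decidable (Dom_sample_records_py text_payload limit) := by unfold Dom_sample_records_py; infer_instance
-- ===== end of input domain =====

-- B replaces A's accumulator/flush state machine by a run-based block splitter and computes
-- blank_count as len(lines) - len(non_empty); objective: simpler (no speed claim).


-- shared trivial helpers: Python truthiness of line.strip(), and a flushed block
def pvBlank (l : String) : Bool := PySem.Str.strip l == ""
def pvMkBlock (cur : List String) : String := PySem.Str.strip (PySem.Str.join "\n" cur)

-- ===== PORT A =====
-- one step of A's for-loop over (blocks, current)
def pvStepA (st : List String × List String) (line : String) : List String × List String :=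
  if ¬ pvBlank line then (st.1, st.2 ++ [PySem.Str.rstrip line])
  else if st.2 ≠ [] then (st.1 ++ [pvMkBlock st.2], [])
  else st

-- the flush after the loop ('if current: blocks.append(...)')
def pvFlushA (st : List String × List String) : List String :=
  if st.2 ≠ [] then st.1 ++ [pvMkBlock st.2] else st.1

def sample_records_py (text_payload : List (String × List (List (String × String)))) (limit : Int) : List String :=
  let lines := ((PySem.Dict.mk text_payload).getD "lines" []).map
    (fun item => (PySem.Dict.mk item).getD "text" "")
  let non_empty := (lines.filter (fun l => !(pvBlank l))).map PySem.Str.strip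
  if non_empty = [] then []
  else
    let blank_count := ((lines.filter (fun l => pvBlank l)).map (fun _ => (1 : Int))).sum
    if blank_count ≥ 2 then
      let blocks := pvFlushA (lines.foldl pvStepA ([], []))
      if (blocks.length : Int) ≥ 2 then PySem.List.slice blocks none (some limit)
      else PySem.List.slice non_empty none (some limit)
    else PySem.List.slice non_empty none (some limit)

-- ===== PORT B =====
-- run-based splitter: skip a blank line, else take the maximal non-blank run as one block
def pvBlocksB : List String → List String
  | [] => []
  | l :: rest =>
    if pvBlank l then pvBlocksB rest
    else
      pvMkBlock ((l :: rest.takeWhile (fun x => !(pvBlank x))).map PySem.Str.rstrip) ::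
        pvBlocksB (rest.dropWhile (fun x => !(pvBlank x)))
termination_by ls => ls.length
decreasing_by
  · simp
  · exact Nat.lt_succ_of_le (List.length_dropWhile_le _ _)

def sample_records_py_alt (text_payload : List (String × List (List (String × String)))) (limit : Int) : List String :=
  let lines := ((PySem.Dict.mk text_payload).getD "lines" []).map
    (fun item => (PySem.Dict.mk item).getD "text" "")
  let non_empty := (lines.map PySem.Str.strip).filter (fun s => !(s == ""))
  if non_empty = [] then []
  else if (lines.length : Int) - (non_empty.length : Int) ≥ 2 then
    let blocks := pvBlocksB lines
    if (blocks.length : Int) ≥ 2 then PySem.List.slice blocks none (some limit)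
    else PySem.List.slice non_empty none (some limit)
  else PySem.List.slice non_empty none (some limit)

-- ===== PRECONDITION & SPEC =====
def Spec_sample_records_py (text_payload : List (String × List (List (String × String)))) (limit : Int) (out : List String) : Prop := out = sample_records_py_alt text_payload limit
instance (text_payload : List (String × List (List (String × String)))) (limit : Int) (out : List String) : Decidable (Spec_sample_records_py text_payload limit out) := by unfold Spec_sample_records_py; infer_instance

-- ===== CLAIM (what is proved, stated in full; the proofs are below) =====
def Claim_equal_sample_records_py : Prop := ∀ (text_payload : List (String × List (List (String × String)))) (limit : Int), Dom_sample_records_py text_payload limit → Spec_sample_records_py text_payload limit (sample_records_py text_payload limit)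

-- ===== LEMMAS AND PROOFS =====

-- A's non_empty equals B's non_empty
theorem pv_non_empty_eq (lines : List String) :
    (lines.filter (fun l => !(pvBlank l))).map PySem.Str.strip
      = (lines.map PySem.Str.strip).filter (fun s => !(s == "")) := by
  induction lines with
  | nil => rfl
  | cons l ls ih =>
    simp only [List.map_cons, List.filter_cons, pvBlank] at *
    by_cases h : PySem.Str.strip l = "" <;> simp [h, ih]

-- blank count (sum of 1s) = total − non-blank count
theorem pv_blank_count_eq (lines : List String) :
    ((lines.filter (fun l => pvBlank l)).map (fun _ => (1 : Int))).sum
      = (lines.length : Int) - ((lines.filter (fun l => !(pvBlank l))).length : Int) := by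
  have h1 : ((lines.filter (fun l => pvBlank l)).map (fun _ => (1 : Int))).sum
      = ((lines.filter (fun l => pvBlank l)).length : Int) := by
    simp
  have h2 : lines.length = (lines.filter (fun l => pvBlank l)).length
      + (lines.filter (fun l => !(pvBlank l))).length :=
    List.length_eq_length_filter_add _
  rw [h1]
  omega

-- main loop invariant: A's fold-and-flush equals B's run splitter, any pending state
theorem pv_loop_eq (lines : List String) : ∀ (blocks cur : List String),
    pvFlushA (lines.foldl pvStepA (blocks, cur))
      = blocks ++ (if cur = [] then pvBlocksB lines
          else pvMkBlock (cur ++ (lines.takeWhile (fun x => !(pvBlank x))).map PySem.Str.rstrip)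
            :: pvBlocksB (lines.dropWhile (fun x => !(pvBlank x)))) := by
  induction lines with
  | nil =>
    intro blocks cur
    by_cases h : cur = [] <;> simp [pvFlushA, h, pvBlocksB]
  | cons l ls ih =>
    intro blocks cur
    by_cases hb : pvBlank l
    · by_cases hc : cur = []
      · simp [List.foldl, pvStepA, hb, hc, ih, pvBlocksB]
      · simp only [List.foldl, pvStepA, hb, hc, not_true, if_false, ne_eq]
        simp [ih, pvBlocksB, hb]
    · have hq : (fun x => !(pvBlank x)) l = true := by simp [hb]
      by_cases hc : cur = []
      · simp only [List.foldl, pvStepA, hb]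
        rw [ih]
        simp [hc, pvBlocksB, hb]
      · simp only [List.foldl, pvStepA, hb]
        rw [ih]
        simp [hc, List.takeWhile, List.dropWhile, hq, List.append_assoc]

theorem pv_blocks_eq (lines : List String) :
    pvFlushA (lines.foldl pvStepA ([], [])) = pvBlocksB lines := by
  simpa using pv_loop_eq lines [] []

-- ===== VERDICT (by name: the statement is the Claim_ definition above) =====
theorem sample_records_py_spec : Claim_equal_sample_records_py := by
  intro text_payload limit _
  unfold Spec_sample_records_py sample_records_py sample_records_py_alt
  simp only []
  set lines := ((PySem.Dict.mk text_payload).getD "lines" []).map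
    (fun item => (PySem.Dict.mk item).getD "text" "") with hlines
  rw [← pv_non_empty_eq lines]
  set ne' := (lines.filter (fun l => !(pvBlank l))).map PySem.Str.strip with hne
  have hlen : ne'.length = (lines.filter (fun l => !(pvBlank l))).length := by
    simp [hne]
  by_cases h0 : ne' = []
  · simp [h0]
  · simp only [h0, ite_false]
    have hbc := pv_blank_count_eq lines
    rw [pv_blocks_eq lines, hbc, hlen]
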